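-- pv_equiv track=rewrite | github.com/slidracoon72/leetcode | Meta_OA_1.py | distribute_numbers
-- ===== SOURCE A (Python) =====
-- from typing import List
--
-- def distribute_numbers(numbers: List[int]) -> List[int]:
--     first, second = [numbers[0]], [numbers[1]]
--
--     def count_greater(arr, value):
--         count = 0
--         for x in arr:
--             if x > value:
--                 count += 1
--         return count
--
--     for i in range(2, len(numbers)):
--         value = numbers[i]
--         first_count = count_greater(first, value)
--         second_count = count_greater(second, value)
--
--         if first_count > second_count:
--             first.append(value)
--         elif second_count > first_count:
--             second.append(value)
--         elif len(first) < len(second):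
--             first.append(value)
--         elif len(second) < len(first):
--             second.append(value)
--         else:
--             first.append(value)
--
--     return first + second
-- ===== SOURCE B (Python) =====
-- from typing import List
--
-- def distribute_numbers(numbers: List[int]) -> List[int]:
--     # Sorted-mirror strategy: keep each output list alongside a sorted copy;
--     # "count greater than v" becomes len - bisect_right via binary search,
--     # instead of A's linear rescan of the whole list at every step.
--     def bisect_right(s, v):
--         lo, hi = 0, len(s)
--         while lo < hi:
--             mid = (lo + hi) // 2
--             if v < s[mid]:
--                 hi = mid
--             else:
--                 lo = mid + 1
--         return lo
--
--     first, second = [numbers[0]], [numbers[1]]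
--     fs, ss = [numbers[0]], [numbers[1]]  # sorted mirrors of first / second
--     for v in numbers[2:]:
--         fc = len(fs) - bisect_right(fs, v)  # elements of first greater than v
--         sc = len(ss) - bisect_right(ss, v)
--         if fc > sc or (fc == sc and len(first) <= len(second)):
--             first.append(v)
--             fs.insert(bisect_right(fs, v), v)
--         else:
--             second.append(v)
--             ss.insert(bisect_right(ss, v), v)
--     return first + second
-- ===== Notes on version B (the rewrite author's own statement) =====
-- stated objective: faster
-- what changed: Instead of rescanning each output list linearly to count elements greater than the new value, B maintains a sorted mirror of each list and gets the count as len - bisect_right via hand-written binary search, inserting the value into the mirror at its sorted position.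
-- outside the precondition, e.g. on distribute_numbers([0]): A raises IndexError, B raises IndexError; on distribute_numbers([1]): A raises IndexError, B raises IndexError
import Mathlib
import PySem

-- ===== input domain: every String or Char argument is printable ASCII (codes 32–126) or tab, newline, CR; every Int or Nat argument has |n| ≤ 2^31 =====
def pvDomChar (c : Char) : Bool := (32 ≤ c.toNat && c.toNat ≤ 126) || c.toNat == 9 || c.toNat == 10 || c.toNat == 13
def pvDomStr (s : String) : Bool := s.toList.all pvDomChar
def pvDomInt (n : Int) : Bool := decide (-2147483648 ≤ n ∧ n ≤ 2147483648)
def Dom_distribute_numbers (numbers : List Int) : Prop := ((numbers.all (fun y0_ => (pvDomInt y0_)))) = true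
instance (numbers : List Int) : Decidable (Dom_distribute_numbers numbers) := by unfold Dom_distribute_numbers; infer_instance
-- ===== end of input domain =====

-- B replaces A's linear "count greater" rescans by binary search on sorted mirror lists (objective: faster).

-- ===== PORT A =====
-- A's inner helper count_greater: a linear pass incrementing a counter
def pvCountGreater (arr : List Int) (value : Int) : Int :=
  arr.foldl (fun count x => if x > value then count + 1 else count) 0

-- the body of A's 'for i in range(2, len(numbers))' loop
def pvStepA (st : List Int × List Int) (value : Int) : List Int × List Int :=
  let first := st.1
  let second := st.2
  let first_count := pvCountGreater first value
  let second_count := pvCountGreater second value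
  if first_count > second_count then (first ++ [value], second)
  else if second_count > first_count then (first, second ++ [value])
  else if first.length < second.length then (first ++ [value], second)
  else if second.length < first.length then (first, second ++ [value])
  else (first ++ [value], second)

def distribute_numbers (numbers : List Int) : List Int :=
  match numbers with
  | n0 :: n1 :: rest =>
    -- 'for i in range(2, len(numbers)): value = numbers[i]' iterates over numbers[2:] = rest
    let p := rest.foldl pvStepA ([n0], [n1])
    p.1 ++ p.2
  | _ => []   -- numbers[0] / numbers[1] raise IndexError here; excluded by Pre_

-- ===== PORT B =====
-- Source B's hand-written bisect_right is the standard 'while lo < hi' binary search,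
-- exactly the prelude primitive PySem.List.bisectRight (cited, not re-rolled).
-- state: ((first, fs), (second, ss)) with fs/ss the sorted mirrors
def pvStepB (st : (List Int × List Int) × (List Int × List Int)) (v : Int) :
    (List Int × List Int) × (List Int × List Int) :=
  let first := st.1.1
  let fs := st.1.2
  let second := st.2.1
  let ss := st.2.2
  let fc : Int := (fs.length : Int) - (PySem.List.bisectRight fs v : Int)
  let sc : Int := (ss.length : Int) - (PySem.List.bisectRight ss v : Int)
  if fc > sc ∨ (fc = sc ∧ first.length ≤ second.length) then
    -- fs.insert(bisect_right(fs, v), v): position is in [0, len fs], so = insertIdx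
    ((first ++ [v], fs.insertIdx (PySem.List.bisectRight fs v) v), (second, ss))
  else
    ((first, fs), (second ++ [v], ss.insertIdx (PySem.List.bisectRight ss v) v))

def distribute_numbers_alt (numbers : List Int) : List Int :=
  match numbers with
  | n0 :: rest0 =>
    match rest0 with
    | n1 :: rest =>
      let p := rest.foldl pvStepB (([n0], [n0]), ([n1], [n1]))
      p.1.1 ++ p.2.1
    | [] => []   -- numbers[1] raises IndexError here; excluded by Pre_
  | [] => []   -- numbers[0] raises IndexError here; excluded by Pre_

-- ===== PRECONDITION & SPEC =====
-- Pre_ excludes lists of length < 2, on which A (and B) raise IndexError at numbers[0] / numbers[1].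
def Pre_distribute_numbers (numbers : List Int) : Prop := 2 ≤ numbers.length
instance (numbers : List Int) : Decidable (Pre_distribute_numbers numbers) := by
  unfold Pre_distribute_numbers; infer_instance

def pvWitness_distribute_numbers : List Int := [3, 1, 2, 2, 5]

def Spec_distribute_numbers (numbers : List Int) (out : List Int) : Prop :=
  out = distribute_numbers_alt numbers
instance (numbers : List Int) (out : List Int) : Decidable (Spec_distribute_numbers numbers out) := by
  unfold Spec_distribute_numbers; infer_instance

-- ===== CLAIM (what is proved, stated in full; the proofs are below) =====
def Claim_equal_distribute_numbers : Prop := ∀ (numbers : List Int), Dom_distribute_numbers numbers → Pre_distribute_numbers numbers → Spec_distribute_numbers numbers (distribute_numbers numbers)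

-- ===== LEMMAS AND PROOFS =====

-- A's counter fold is countP (foldl_count_if with the Int accumulator 0)
lemma pvCountGreater_eq_countP (arr : List Int) (v : Int) :
    pvCountGreater arr v = (arr.countP (fun x => decide (v < x)) : Int) := by
  unfold pvCountGreater
  have := PySem.List.foldl_count_if (fun x : Int => decide (v < x)) arr 0
  simpa [gt_iff_lt] using this

lemma insertIdx_eq_take_cons_drop (l : List Int) (i : Nat) (a : Int) (h : i ≤ l.length) :
    l.insertIdx i a = l.take i ++ a :: l.drop i := by
  induction l generalizing i with
  | nil => simp at h; simp [h]
  | cons x xs ih =>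
    cases i with
    | zero => simp
    | succ n => simp [List.insertIdx_succ_cons, ih n (by simpa using h)]

-- on a sorted list, len - bisect_right = number of elements strictly greater
lemma sub_bisectRight_eq_countP (s : List Int) (v : Int)
    (hs : s.Pairwise (· ≤ ·)) :
    (s.length : Int) - (PySem.List.bisectRight s v : Int)
      = (s.countP (fun x => decide (v < x)) : Int) := by
  obtain ⟨hle, hlow, hhigh⟩ := PySem.List.bisectRight_spec s v hs
  set r := PySem.List.bisectRight s v with hr
  have hsplit : s = s.take r ++ s.drop r := (List.take_append_drop r s).symm
  have h1 : (s.take r).countP (fun x => decide (v < x)) = 0 := by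
    rw [List.countP_eq_zero]
    intro a ha
    obtain ⟨j, hj, rfl⟩ := List.mem_iff_getElem.1 ha
    have hjr : j < r ∧ j < s.length := by simpa using hj
    have : s[j] ≤ v := hlow j hjr.2 hjr.1
    simpa [List.getElem_take] using not_lt.2 this
  have h2 : (s.drop r).countP (fun x => decide (v < x)) = (s.drop r).length := by
    rw [List.countP_eq_length]
    intro a ha
    obtain ⟨j, hj, rfl⟩ := List.mem_iff_getElem.1 ha
    have hj' : r + j < s.length := by simpa [Nat.lt_sub_iff_add_lt'] using (by simpa using hj : j < s.length - r)
    have : v < s[r + j] := hhigh (r + j) hj' (Nat.le_add_right _ _)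
    simpa [List.getElem_drop] using this
  have : s.countP (fun x => decide (v < x)) = s.length - r := by
    conv_lhs => rw [hsplit]
    rw [List.countP_append, h1, h2, List.length_drop]
    omega
  rw [this]
  omega

-- inserting at bisect_right keeps the mirror sorted
lemma sorted_insertIdx_bisectRight (s : List Int) (v : Int)
    (hs : s.Pairwise (· ≤ ·)) :
    (s.insertIdx (PySem.List.bisectRight s v) v).Pairwise (· ≤ ·) := by
  obtain ⟨hle, hlow, hhigh⟩ := PySem.List.bisectRight_spec s v hs
  set r := PySem.List.bisectRight s v with hr
  rw [insertIdx_eq_take_cons_drop s r v hle, List.pairwise_append]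
  refine ⟨hs.sublist (List.take_sublist _ _), ?_, ?_⟩
  · constructor
    · intro b hb
      obtain ⟨j, hj, rfl⟩ := List.mem_iff_getElem.1 hb
      have hj' : r + j < s.length := by simpa [Nat.lt_sub_iff_add_lt'] using (by simpa using hj : j < s.length - r)
      have : v < s[r + j] := hhigh (r + j) hj' (Nat.le_add_right _ _)
      simpa [List.getElem_drop] using this.le
    · exact hs.sublist (List.drop_sublist _ _)
  · intro a ha b hb
    obtain ⟨j, hj, rfl⟩ := List.mem_iff_getElem.1 ha
    have hjr : j < r ∧ j < s.length := by simpa using hj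
    have hav : s[j] ≤ v := hlow j hjr.2 hjr.1
    rcases List.mem_cons.1 hb with rfl | hb
    · simpa [List.getElem_take] using hav
    · obtain ⟨k, hk, rfl⟩ := List.mem_iff_getElem.1 hb
      have hk' : r + k < s.length := by simpa [Nat.lt_sub_iff_add_lt'] using (by simpa using hk : k < s.length - r)
      have : v < s[r + k] := hhigh (r + k) hk' (Nat.le_add_right _ _)
      simp only [List.getElem_take, List.getElem_drop]
      exact hav.trans this.le

-- the simulation relation between A's state and B's state
def pvRel (a : List Int × List Int) (b : (List Int × List Int) × (List Int × List Int)) : Prop :=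
  b.1.1 = a.1 ∧ b.2.1 = a.2 ∧
  b.1.2.Perm a.1 ∧ b.1.2.Pairwise (· ≤ ·) ∧
  b.2.2.Perm a.2 ∧ b.2.2.Pairwise (· ≤ ·)

lemma pvStep_rel (a : List Int × List Int) (b : (List Int × List Int) × (List Int × List Int))
    (v : Int) (h : pvRel a b) : pvRel (pvStepA a v) (pvStepB b v) := by
  obtain ⟨f, s⟩ := a
  obtain ⟨⟨f', fs⟩, s', ss⟩ := b
  obtain ⟨hf, hs, hpf, hsf, hps, hss⟩ := h
  dsimp only at hf hs hpf hsf hps hss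
  subst hf hs
  have hfc : (fs.length : Int) - (PySem.List.bisectRight fs v : Int) = pvCountGreater f' v := by
    rw [sub_bisectRight_eq_countP fs v hsf, hpf.countP_eq, pvCountGreater_eq_countP]
  have hsc : (ss.length : Int) - (PySem.List.bisectRight ss v : Int) = pvCountGreater s' v := by
    rw [sub_bisectRight_eq_countP ss v hss, hps.countP_eq, pvCountGreater_eq_countP]
  have hrf := (PySem.List.bisectRight_spec fs v hsf).1
  have hrs := (PySem.List.bisectRight_spec ss v hss).1
  have permF : (fs.insertIdx (PySem.List.bisectRight fs v) v).Perm (f' ++ [v]) :=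
    (List.perm_insertIdx v fs hrf).trans ((hpf.cons v).trans (List.perm_append_singleton v f').symm)
  have permS : (ss.insertIdx (PySem.List.bisectRight ss v) v).Perm (s' ++ [v]) :=
    (List.perm_insertIdx v ss hrs).trans ((hps.cons v).trans (List.perm_append_singleton v s').symm)
  have sortF := sorted_insertIdx_bisectRight fs v hsf
  have sortS := sorted_insertIdx_bisectRight ss v hss
  simp only [pvStepA, pvStepB]
  rw [hfc, hsc]
  split_ifs with hb h1 h2 h3 h4 <;>
    first
    | exact ⟨rfl, rfl, permF, sortF, hps, hss⟩
    | exact ⟨rfl, rfl, hpf, hsf, permS, sortS⟩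
    | (exfalso; omega)

-- fold preserves the relation
lemma pvFold_rel (rest : List Int) :
    ∀ a b, pvRel a b → pvRel (rest.foldl pvStepA a) (rest.foldl pvStepB b) := by
  induction rest with
  | nil => intro a b h; exact h
  | cons v t ih => intro a b h; exact ih _ _ (pvStep_rel a b v h)

-- ===== VERDICT (by name: the statement is the Claim_ definition above) =====
theorem distribute_numbers_spec : Claim_equal_distribute_numbers := by
  intro numbers _ hpre
  unfold Spec_distribute_numbers
  match numbers with
  | n0 :: n1 :: rest =>
    have h0 : pvRel ([n0], [n1]) (([n0], [n0]), ([n1], [n1])) := by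
      refine ⟨rfl, rfl, List.Perm.refl _, ?_, List.Perm.refl _, ?_⟩ <;> simp
    have h := pvFold_rel rest ([n0], [n1]) (([n0], [n0]), ([n1], [n1])) h0
    simp only [distribute_numbers, distribute_numbers_alt]
    rw [h.1, h.2.1]
  | [] => exact absurd hpre (by simp [Pre_distribute_numbers])
  | [_] => exact absurd hpre (by simp [Pre_distribute_numbers])
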